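-- pv_equiv track=rewrite | github.com/tut211302/schedule-coordinator-bot | backend/services/hp_services.py | get_budget_code
-- ===== SOURCE A (Python) =====
-- from typing import Optional, Dict, Any, List
--
-- BUDGET_LIST=[
--         {"code" : "B009", "min" : 0, "max" : 500},
--         {"code" : "B010", "min" : 501, "max" : 1000},
--         {"code" : "B011", "min" : 1001, "max" : 1500},
--         {"code" : "B001", "min" : 1501, "max" : 2000},
--         {"code" : "B002", "min" : 2001, "max" : 3000},
--         {"code" : "B003", "min" : 3001, "max" : 4000},
--         {"code" : "B008", "min" : 4001, "max" : 5000},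
--         {"code" : "B004", "min" : 5001, "max" : 7000},
--         {"code" : "B005", "min" : 7001, "max" : 10000},
--         {"code" : "B006", "min" : 10001, "max" : 15000},
--         {"code" : "B012", "min" : 15001, "max" : 20000},
--         {"code" : "B013", "min" : 20001, "max" : 30000},
--         {"code" : "B014", "min" : 30001, "max" : 100000},
--         ]
--
-- def get_budget_code(min_price: int,max_price: int) -> Optional[str]:
--     if min_price > max_price:
--         return None
--
--     codes = set()
--
--     for budget in BUDGET_LIST:
--         budget_min = budget["min"]
--         budget_max = budget["max"]
--
--         if budget_min <= max_price and budget_max >= min_price: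
--             codes.add(budget["code"])
--
--     sorted_codes = []
--     for budget in BUDGET_LIST:
--         if budget["code"] in codes:
--             sorted_codes.append(budget["code"])
--     result = sorted_codes[:2]
--
--     if result:
--         return ",".join(result)
--     else:
--         return None
-- ===== SOURCE B (Python) =====
-- def get_budget_code(min_price: int, max_price: int):
--     if min_price > max_price:
--         return None
--     result = []
--     for budget in BUDGET_LIST:
--         if budget["min"] <= max_price and budget["max"] >= min_price:
--             result.append(budget["code"])
--             if len(result) == 2:
--                 break
--     return ",".join(result) if result else None
--
-- BUDGET_LIST=[
--         {"code" : "B009", "min" : 0, "max" : 500},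
--         {"code" : "B010", "min" : 501, "max" : 1000},
--         {"code" : "B011", "min" : 1001, "max" : 1500},
--         {"code" : "B001", "min" : 1501, "max" : 2000},
--         {"code" : "B002", "min" : 2001, "max" : 3000},
--         {"code" : "B003", "min" : 3001, "max" : 4000},
--         {"code" : "B008", "min" : 4001, "max" : 5000},
--         {"code" : "B004", "min" : 5001, "max" : 7000},
--         {"code" : "B005", "min" : 7001, "max" : 10000},
--         {"code" : "B006", "min" : 10001, "max" : 15000},
--         {"code" : "B012", "min" : 15001, "max" : 20000},
--         {"code" : "B013", "min" : 20001, "max" : 30000},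
--         {"code" : "B014", "min" : 30001, "max" : 100000},
--         ]
-- ===== Notes on version B (the rewrite author's own statement) =====
-- stated objective: simpler
-- what changed: B replaces A's two passes over BUDGET_LIST (collect overlapping codes into a set, then re-scan the list to order them and slice [:2]) with one ordered pass that appends each overlapping code directly and breaks as soon as two are collected.
import Mathlib
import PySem

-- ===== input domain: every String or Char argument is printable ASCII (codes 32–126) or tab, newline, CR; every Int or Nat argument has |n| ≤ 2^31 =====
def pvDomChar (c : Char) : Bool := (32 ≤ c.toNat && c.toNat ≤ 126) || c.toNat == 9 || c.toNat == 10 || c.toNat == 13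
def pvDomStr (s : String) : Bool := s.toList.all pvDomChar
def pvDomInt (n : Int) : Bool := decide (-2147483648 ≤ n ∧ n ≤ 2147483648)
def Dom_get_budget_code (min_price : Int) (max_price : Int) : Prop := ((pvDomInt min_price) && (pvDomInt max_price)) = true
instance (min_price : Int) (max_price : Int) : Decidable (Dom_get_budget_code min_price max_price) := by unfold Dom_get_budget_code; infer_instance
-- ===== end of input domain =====

-- B replaces A's two passes (overlap codes into a set, then re-scan to order and slice [:2])
-- with one ordered pass appending overlapping codes and breaking at two — simpler, same result.

-- ===== PORT A =====
-- BUDGET_LIST: each dict {"code","min","max"} as a (code, min, max) triple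
def pvBudgetList : List (String × Int × Int) :=
  [("B009", 0, 500), ("B010", 501, 1000), ("B011", 1001, 1500), ("B001", 1501, 2000),
   ("B002", 2001, 3000), ("B003", 3001, 4000), ("B008", 4001, 5000), ("B004", 5001, 7000),
   ("B005", 7001, 10000), ("B006", 10001, 15000), ("B012", 15001, 20000),
   ("B013", 20001, 30000), ("B014", 30001, 100000)]

def get_budget_code (min_price : Int) (max_price : Int) : Option String :=
  if min_price > max_price then none
  else
    let codes : PySem.Set String :=
      pvBudgetList.foldl (fun codes budget =>
        if budget.2.1 ≤ max_price ∧ budget.2.2 ≥ min_price then PySem.Set.add codes budget.1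
        else codes) PySem.Set.empty
    let sorted_codes : List String :=
      pvBudgetList.foldl (fun acc budget =>
        if PySem.Set.contains codes budget.1 then acc ++ [budget.1] else acc) []
    let result := PySem.List.slice sorted_codes none (some 2)
    if result ≠ [] then some (PySem.Str.join "," result) else none

-- ===== PORT B =====
-- the single for-loop of Source B: append on overlap, break once two codes are collected
def pvAltLoop (min_price : Int) (max_price : Int) :
    List (String × Int × Int) → List String → List String
  | [], result => result
  | budget :: rest, result =>
    if budget.2.1 ≤ max_price ∧ budget.2.2 ≥ min_price then
      let result' := result ++ [budget.1]
      if result'.length = 2 then result' else pvAltLoop min_price max_price rest result'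
    else pvAltLoop min_price max_price rest result

def get_budget_code_alt (min_price : Int) (max_price : Int) : Option String :=
  if min_price > max_price then none
  else
    let result := pvAltLoop min_price max_price pvBudgetList []
    if result ≠ [] then some (PySem.Str.join "," result) else none

-- ===== PRECONDITION & SPEC =====
def Spec_get_budget_code (min_price : Int) (max_price : Int) (out : Option String) : Prop := out = get_budget_code_alt min_price max_price
instance (min_price : Int) (max_price : Int) (out : Option String) : Decidable (Spec_get_budget_code min_price max_price out) := by unfold Spec_get_budget_code; infer_instance

-- ===== CLAIM (what is proved, stated in full; the proofs are below) =====
def Claim_equal_get_budget_code : Prop := ∀ (min_price : Int) (max_price : Int), Dom_get_budget_code min_price max_price → Spec_get_budget_code min_price max_price (get_budget_code min_price max_price)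

-- ===== LEMMAS AND PROOFS =====

-- the overlap test, shared shape of both ports' conditions
def pvCond (min_price max_price : Int) (b : String × Int × Int) : Bool :=
  decide (b.2.1 ≤ max_price ∧ b.2.2 ≥ min_price)

-- membership in A's foldl-built set
lemma pv_mem_codes_foldl (min_price max_price : Int)
    (L : List (String × Int × Int)) (s0 : PySem.Set String) (x : String) :
    x ∈ L.foldl (fun s b => if b.2.1 ≤ max_price ∧ b.2.2 ≥ min_price then PySem.Set.add s b.1 else s) s0 ↔
      x ∈ s0 ∨ ∃ b ∈ L, (b.2.1 ≤ max_price ∧ b.2.2 ≥ min_price) ∧ b.1 = x := by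
  induction L generalizing s0 with
  | nil => simp
  | cons c rest ih =>
    simp only [List.foldl_cons]
    rw [ih]
    by_cases hc : c.2.1 ≤ max_price ∧ c.2.2 ≥ min_price
    · simp only [if_pos hc, PySem.Set.mem_add, List.mem_cons]
      aesop
    · simp only [if_neg hc, List.mem_cons]
      constructor
      · rintro (h0 | ⟨b', hm, hp, hx⟩)
        · exact .inl h0
        · exact .inr ⟨b', .inr hm, hp, hx⟩
      · rintro (h0 | ⟨b', (rfl | hm), hp, hx⟩)
        · exact .inl h0
        · exact absurd hp hc
        · exact .inr ⟨b', hm, hp, hx⟩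

-- B's loop with room left equals "first two overlapping codes in order"
lemma pv_altLoop_eq (min_price max_price : Int) (L : List (String × Int × Int))
    (acc : List String) (h : acc.length < 2) :
    pvAltLoop min_price max_price L acc =
      (acc ++ (L.filter (pvCond min_price max_price)).map (·.1)).take 2 := by
  induction L generalizing acc with
  | nil =>
    simp [pvAltLoop, List.take_of_length_le (Nat.le_of_lt h)]
  | cons budget rest ih =>
    by_cases hb : budget.2.1 ≤ max_price ∧ budget.2.2 ≥ min_price
    · simp only [pvAltLoop, if_pos hb]
      by_cases hlen : (acc ++ [budget.1]).length = 2
      · have hacc : acc.length = 1 := by simp at hlen; omega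
        rw [if_pos hlen]
        match acc, hacc with
        | [a], _ => simp [pvCond, hb]
      · have hacc : acc = [] := by
          cases acc with
          | nil => rfl
          | cons x xs => simp only [List.length_cons, List.length_append, List.length_nil] at hlen h; omega
        subst hacc
        rw [if_neg hlen, ih ([] ++ [budget.1]) (by simp)]
        simp [pvCond, hb]
    · simp only [pvAltLoop, if_neg hb]
      rw [ih _ h]
      simp [pvCond, hb]

-- xs[:2] is take 2
lemma pv_slice_two (xs : List String) : PySem.List.slice xs none (some 2) = xs.take 2 := by
  simp [pysem]

-- for an entry of BUDGET_LIST, membership of its code in A's set is exactly the overlap test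
lemma pv_contains_eq (min_price max_price : Int) (b : String × Int × Int)
    (hb : b ∈ pvBudgetList) :
    PySem.Set.contains
      (pvBudgetList.foldl (fun s c => if c.2.1 ≤ max_price ∧ c.2.2 ≥ min_price then PySem.Set.add s c.1 else s)
        PySem.Set.empty) b.1 = pvCond min_price max_price b := by
  have hnodup : (pvBudgetList.map Prod.fst).Nodup := by decide
  rw [Bool.eq_iff_iff, PySem.Set.contains_iff, pv_mem_codes_foldl]
  constructor
  · rintro (h0 | ⟨b', hm, hp, hx⟩)
    · simp [PySem.Set.empty] at h0
    · have : b' = b := List.inj_on_of_nodup_map hnodup hm hb hx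
      subst this
      simpa [pvCond] using hp
  · intro hp
    exact .inr ⟨b, hb, by simpa [pvCond] using hp, rfl⟩

theorem get_budget_code_spec_aux (min_price max_price : Int) :
    get_budget_code min_price max_price = get_budget_code_alt min_price max_price := by
  by_cases hgt : min_price > max_price
  · simp [get_budget_code, get_budget_code_alt, hgt]
  · simp only [get_budget_code, get_budget_code_alt, if_neg hgt]
    rw [pv_altLoop_eq min_price max_price pvBudgetList [] (by simp)]
    rw [PySem.List.foldl_append_if]
    rw [List.filter_congr (fun b hb => pv_contains_eq min_price max_price b hb)]
    rw [pv_slice_two]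

-- ===== VERDICT (by name: the statement is the Claim_ definition above) =====
theorem get_budget_code_spec : Claim_equal_get_budget_code := by
  intro minp maxp _
  show _ = _
  exact get_budget_code_spec_aux minp maxp
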